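-- pv_equiv track=rewrite | github.com/tcu-sdlab/marui_novice_linter | python_files/AbcFly_20193307_1.py | section
-- ===== SOURCE A (Python) =====
-- def section(string):
--
--     result=['','','','']
--
--     flag=True
--
--     for ch in string:
--
--         if len(result[1])!=0 and ch.isalpha():
--
--             flag=False
--
--         if flag==True:
--
--             if ch.isalpha():
--
--                 result[0]+=ch
--
--             if ch.isdigit():
--
--                 result[1]+=ch
--
--         if flag==False:
--
--             if ch.isalpha():
--
--                 result[2]+=ch
--
--             if ch.isdigit():
--
--                 result[3]+=ch
--
--     return result
-- ===== SOURCE B (Python) =====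
-- def section(string):
--     seen_digit = False
--     k = len(string)
--     for i, ch in enumerate(string):
--         if ch.isalpha() and seen_digit:
--             k = i
--             break
--         if ch.isdigit():
--             seen_digit = True
--     pre, suf = string[:k], string[k:]
--     return [''.join(c for c in pre if c.isalpha()),
--             ''.join(c for c in pre if c.isdigit()),
--             ''.join(c for c in suf if c.isalpha()),
--             ''.join(c for c in suf if c.isdigit())]
-- ===== Notes on version B (the rewrite author's own statement) =====
-- stated objective: alternative
-- what changed: A builds all four buckets in one stateful pass with a flag that flips at the first alpha-after-a-digit; B first locates that split index with a single seen-digit scan, then slices the string and builds each bucket by filtering the two slices.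
import Mathlib
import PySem

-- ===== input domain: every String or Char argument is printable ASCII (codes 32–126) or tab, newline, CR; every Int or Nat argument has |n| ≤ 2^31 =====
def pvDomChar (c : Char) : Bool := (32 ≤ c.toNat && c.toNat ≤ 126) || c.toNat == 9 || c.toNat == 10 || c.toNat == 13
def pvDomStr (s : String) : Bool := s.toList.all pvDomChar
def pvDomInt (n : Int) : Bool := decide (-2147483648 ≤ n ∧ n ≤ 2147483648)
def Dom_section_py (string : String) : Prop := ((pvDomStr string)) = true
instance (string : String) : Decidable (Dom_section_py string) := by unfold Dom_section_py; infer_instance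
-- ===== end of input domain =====

-- B replaces A's single stateful-flag pass by locate-the-split-index-then-filter-two-slices (different decomposition, same cost).


-- ===== PORT A =====
-- one loop iteration of A: state (result[0..3], flag)
def pvStepA (st : List Char × List Char × List Char × List Char × Bool) (ch : Char) :
    List Char × List Char × List Char × List Char × Bool :=
  match st with
  | (r0, r1, r2, r3, flag) =>
    let flag := if r1.length != 0 && PySem.Chars.isalpha ch then false else flag
    let r0 := if flag == true && PySem.Chars.isalpha ch then r0 ++ [ch] else r0
    let r1 := if flag == true && PySem.Chars.isdigit ch then r1 ++ [ch] else r1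
    let r2 := if flag == false && PySem.Chars.isalpha ch then r2 ++ [ch] else r2
    let r3 := if flag == false && PySem.Chars.isdigit ch then r3 ++ [ch] else r3
    (r0, r1, r2, r3, flag)

def section_py (string : String) : List String :=
  match string.toList.foldl pvStepA ([], [], [], [], true) with
  | (r0, r1, r2, r3, _) => [String.ofList r0, String.ofList r1, String.ofList r2, String.ofList r3]

-- ===== PORT B =====
-- index of the first alpha char once a digit has been seen (default: length)
def pvFindK : List Char → Bool → Nat
  | [], _ => 0
  | c :: rest, sd =>
    if PySem.Chars.isalpha c && sd then 0
    else 1 + pvFindK rest (sd || PySem.Chars.isdigit c)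

def section_py_alt (string : String) : List String :=
  let cs := string.toList
  let k := pvFindK cs false
  let pre := cs.take k
  let suf := cs.drop k
  [String.ofList (pre.filter PySem.Chars.isalpha), String.ofList (pre.filter PySem.Chars.isdigit),
   String.ofList (suf.filter PySem.Chars.isalpha), String.ofList (suf.filter PySem.Chars.isdigit)]

-- ===== PRECONDITION & SPEC =====
def Spec_section_py (string : String) (out : List String) : Prop := out = section_py_alt string
instance (string : String) (out : List String) : Decidable (Spec_section_py string out) := by unfold Spec_section_py; infer_instance

-- ===== CLAIM (what is proved, stated in full; the proofs are below) =====
def Claim_equal_section_py : Prop := ∀ (string : String), Dom_section_py string → Spec_section_py string (section_py string)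

-- ===== LEMMAS AND PROOFS =====
theorem pv_alpha_not_digit (c : Char) (h : PySem.Chars.isalpha c = true) :
    PySem.Chars.isdigit c = false := by
  unfold PySem.Chars.isalpha PySem.Chars.isupper PySem.Chars.islower at h
  unfold PySem.Chars.isdigit
  have h0 : '0'.val.toNat = 48 := rfl
  have h9 : '9'.val.toNat = 57 := rfl
  have hA : 'A'.val.toNat = 65 := rfl
  have hZ : 'Z'.val.toNat = 90 := rfl
  have ha : 'a'.val.toNat = 97 := rfl
  have hz : 'z'.val.toNat = 122 := rfl
  simp only [Char.le_def, UInt32.le_iff_toNat_le, Bool.or_eq_true, Bool.and_eq_true,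
    decide_eq_true_eq, Bool.and_eq_false_iff, decide_eq_false_iff_not, not_le,
    h0, h9, hA, hZ, ha, hz] at *
  omega

-- once A's flag is False it stays False and the tail is partitioned into slots 2/3
theorem pv_fold_false (cs : List Char) (r0 r1 r2 r3 : List Char) :
    cs.foldl pvStepA (r0, r1, r2, r3, false) =
      (r0, r1, r2 ++ cs.filter PySem.Chars.isalpha, r3 ++ cs.filter PySem.Chars.isdigit, false) := by
  induction cs generalizing r2 r3 with
  | nil => simp
  | cons c rest ih =>
    simp only [List.foldl_cons, pvStepA]
    simp only [ite_self, show (false == true) = false from rfl,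
      show (false == false) = true from rfl, Bool.false_and, Bool.true_and,
      Bool.false_eq_true, if_false]
    rw [ih]
    by_cases ha : PySem.Chars.isalpha c = true
    · simp [ha, pv_alpha_not_digit c ha]
    · by_cases hd : PySem.Chars.isdigit c = true
      · simp [ha, hd, List.filter_cons]
      · simp [ha, hd, List.filter_cons]

-- the True phase: A's fold from flag=True equals B's split-at-pvFindK partition,
-- provided r1 (digits so far) is empty exactly when sd is false
theorem pv_fold_true (cs : List Char) (r0 r1 r2 r3 : List Char) (sd : Bool)
    (h : r1.length = 0 ↔ sd = false) :
    cs.foldl pvStepA (r0, r1, r2, r3, true) =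
      (r0 ++ (cs.take (pvFindK cs sd)).filter PySem.Chars.isalpha,
       r1 ++ (cs.take (pvFindK cs sd)).filter PySem.Chars.isdigit,
       r2 ++ (cs.drop (pvFindK cs sd)).filter PySem.Chars.isalpha,
       r3 ++ (cs.drop (pvFindK cs sd)).filter PySem.Chars.isdigit,
       decide (pvFindK cs sd = cs.length)) := by
  induction cs generalizing r0 r1 sd with
  | nil => simp [pvFindK]
  | cons c rest ih =>
    simp only [List.foldl_cons, pvStepA, pvFindK]
    by_cases ha : PySem.Chars.isalpha c = true
    · by_cases hsd : sd = true
      · -- transition: flag flips to False here, c lands in slot 2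
        have hr1 : r1.length ≠ 0 := by
          intro h0; have := h.mp h0; rw [hsd] at this; cases this
        have hc : (r1.length != 0 && PySem.Chars.isalpha c) = true := by simp [ha, hr1]
        rw [hc]
        simp only [if_true, show (false == true) = false from rfl,
          show (false == false) = true from rfl, Bool.false_and, Bool.true_and,
          Bool.false_eq_true, if_false, ha, hsd, Bool.true_and, Bool.and_self, if_true,
          pv_alpha_not_digit c ha, if_false]
        rw [pv_fold_false]
        simp [ha, pv_alpha_not_digit c ha]
      · -- alpha before any digit: c lands in slot 0
        have hsd' : sd = false := by cases sd <;> simp_all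
        have hr1 : r1.length = 0 := h.mpr hsd'
        have hc : (r1.length != 0 && PySem.Chars.isalpha c) = false := by simp [hr1]
        rw [hc]
        simp only [Bool.false_eq_true, if_false, show (true == true) = true from rfl,
          show (true == false) = false from rfl, Bool.true_and, Bool.false_and, if_false,
          ha, hsd', pv_alpha_not_digit c ha, Bool.and_false, Bool.false_or, if_true]
        rw [ih (r0 ++ [c]) r1 false (by simp [hr1])]
        simp [ha, pv_alpha_not_digit c ha, Nat.add_comm 1,
          List.take_succ_cons, List.drop_succ_cons]
    · have haf : PySem.Chars.isalpha c = false := by simpa using ha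
      by_cases hd : PySem.Chars.isdigit c = true
      · -- digit: c lands in slot 1, seen-digit becomes true
        have hc : (r1.length != 0 && PySem.Chars.isalpha c) = false := by simp [haf]
        rw [hc]
        simp only [Bool.false_eq_true, if_false, show (true == true) = true from rfl,
          show (true == false) = false from rfl, Bool.false_and, if_false,
          haf, hd, Bool.and_false, Bool.or_true, Bool.and_true, if_true]
        rw [ih r0 (r1 ++ [c]) true (by simp)]
        simp [haf, hd, Nat.add_comm 1, List.take_succ_cons, List.drop_succ_cons]
      · -- neither alpha nor digit: c is dropped everywhere
        have hdf : PySem.Chars.isdigit c = false := by simpa using hd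
        have hc : (r1.length != 0 && PySem.Chars.isalpha c) = false := by simp [haf]
        rw [hc]
        simp only [Bool.false_eq_true, if_false, show (true == true) = true from rfl,
          show (true == false) = false from rfl, Bool.false_and, if_false,
          haf, hdf, Bool.and_false, Bool.or_false]
        rw [ih r0 r1 sd h]
        simp [haf, hdf, Nat.add_comm 1, List.take_succ_cons, List.drop_succ_cons]

-- ===== VERDICT (by name: the statement is the Claim_ definition above) =====
theorem section_py_spec : Claim_equal_section_py := by
  intro s _
  unfold Spec_section_py section_py section_py_alt
  rw [pv_fold_true s.toList [] [] [] [] false (by simp)]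
  simp
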